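-- pv_equiv track=rewrite | github.com/KKllwetr/Python- | Task5/Searching.py | SearchQuestions
-- ===== SOURCE A (Python) =====
-- def SearchQuestions(_list=[]):
--     _new_list = {}
--     _endOfText = ".!?"
--     _intermediate_list = []
--
--     for i in range(len(_list)):
--         _intermediate_list.append(_list[i])
--         if "?" in _intermediate_list[len(_intermediate_list) - 1]:
--             _new_list.update({len(_new_list) + 1: ' '.join(_intermediate_list)})
--             _intermediate_list.clear()
--         elif "." in _intermediate_list[len(_intermediate_list) - 1] or "!" in _intermediate_list[
--             len(_intermediate_list) - 1]:
--             _intermediate_list.clear()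
--         else:
--             continue
--     lis = [v for v in _new_list.values()]
--     return lis
-- ===== SOURCE B (Python) =====
-- def SearchQuestions(_list=[]):
--     # Repeatedly locate the next terminator word ('.', '!' or '?') in the
--     # remaining suffix; the sentence is the slice up to and including it,
--     # kept when that terminator word contains '?'; then continue after it.
--     res = []
--     rest = _list
--     while True:
--         k = next((i for i, w in enumerate(rest) if any(c in w for c in ".!?")), None)
--         if k is None:
--             return res
--         if '?' in rest[k]:
--             res.append(' '.join(rest[:k + 1]))
--         rest = rest[k + 1:]
-- ===== Notes on version B (the rewrite author's own statement) =====
-- stated objective: alternative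
-- what changed: Replaces A's word-by-word accumulator loop over a length-keyed dict with a find-next-terminator loop: repeatedly locate the index of the next word containing '.', '!' or '?' in the remaining suffix, join the slice up to it when that word contains '?', and continue on the slice after it.
import Mathlib
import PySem

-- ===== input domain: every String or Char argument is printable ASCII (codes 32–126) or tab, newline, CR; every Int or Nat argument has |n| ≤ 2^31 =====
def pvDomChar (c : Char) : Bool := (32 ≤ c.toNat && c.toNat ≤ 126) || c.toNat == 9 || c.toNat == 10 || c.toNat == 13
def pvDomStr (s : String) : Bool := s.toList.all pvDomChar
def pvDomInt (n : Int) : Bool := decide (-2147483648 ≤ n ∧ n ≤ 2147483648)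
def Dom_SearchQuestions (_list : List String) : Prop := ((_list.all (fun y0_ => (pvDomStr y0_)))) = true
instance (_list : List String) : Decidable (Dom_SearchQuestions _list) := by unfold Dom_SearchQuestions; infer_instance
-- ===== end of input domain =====

-- B replaces A's word-by-word accumulator loop by repeated find-next-terminator +
-- slice of the remaining suffix: an alternative decomposition of the same cost.

-- ===== PORT A =====
-- One iteration of A's loop body over the state (_new_list, _intermediate_list).
-- A's 'for i in range(len(_list)): _list[i]' visits the elements in order; the index
-- _intermediate_list[len(_intermediate_list)-1] of the just-appended (hence nonempty)
-- list is its last element, taken by getLastD (exact here).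
def pvStepA (st : PySem.Dict Int String × List String) (w : String) :
    PySem.Dict Int String × List String :=
  let inter := st.2 ++ [w]
  let last := inter.getLastD ""
  if PySem.Str.isIn "?" last then
    (st.1.insert ((st.1.size : Int) + 1) (PySem.Str.join " " inter), [])
  else if PySem.Str.isIn "." last || PySem.Str.isIn "!" last then
    (st.1, [])
  else
    (st.1, inter)

def SearchQuestions (_list : List String) : List String :=
  (_list.foldl pvStepA (PySem.Dict.empty, [])).1.values

-- ===== PORT B =====
-- Source B's terminator test: any(c in w for c in ".!?")
def pvTerm (w : String) : Bool :=
  ".!?".toList.any (fun c => PySem.Str.isIn (String.ofList [c]) w)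

-- Source B's while loop: find the index k of the next terminator word of the remaining
-- suffix (the generator/next expression = findIdx?, none at exhaustion ends the loop),
-- append ' '.join(rest[:k+1]) to the result when '?' in rest[k], continue on rest[k+1:].
-- rest[k] is in range (k is a found index), so pyGet?.getD "" is exact here.
def SearchQuestions_alt (_list : List String) : List String :=
  match h : _list.findIdx? pvTerm with
  | none => []
  | some k =>
      (if PySem.Str.isIn "?" ((PySem.List.pyGet? _list (k : Int)).getD "") then
        [PySem.Str.join " " (PySem.List.slice _list (some 0) (some ((k : Int) + 1)))]
      else []) ++
      SearchQuestions_alt (PySem.List.slice _list (some ((k : Int) + 1)) none)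
termination_by _list.length
decreasing_by
  have hk : k < _list.length := (List.findIdx?_eq_some_iff_getElem.mp h).1
  have : ((k : Int) + 1) = ((k + 1 : Nat) : Int) := by push_cast; ring
  rw [this, PySem.List.slice_from_natCast, List.length_drop]
  omega

-- ===== PRECONDITION & SPEC =====
def Spec_SearchQuestions (_list : List String) (out : List String) : Prop := out = SearchQuestions_alt _list
instance (_list : List String) (out : List String) : Decidable (Spec_SearchQuestions _list out) := by unfold Spec_SearchQuestions; infer_instance

-- ===== CLAIM (what is proved, stated in full; the proofs are below) =====
def Claim_equal_SearchQuestions : Prop := ∀ (_list : List String), Dom_SearchQuestions _list → Spec_SearchQuestions _list (SearchQuestions _list)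

-- ===== LEMMAS AND PROOFS =====

-- take/drop form of one unfolding of B's loop, with the pending prefix `cur`
-- that A carries in _intermediate_list prepended to the emitted sentence.
def pvTail (cur ws : List String) : List String :=
  match ws.findIdx? pvTerm with
  | none => []
  | some k =>
      (if PySem.Str.isIn "?" (ws[k]?.getD "") then
        [PySem.Str.join " " (cur ++ ws.take (k + 1))]
      else []) ++
      SearchQuestions_alt (ws.drop (k + 1))

lemma pvTail_nil_eq (ws : List String) : pvTail [] ws = SearchQuestions_alt ws := by
  rw [SearchQuestions_alt, pvTail]
  cases h : ws.findIdx? pvTerm with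
  | none => rfl
  | some k =>
      dsimp only
      have h1 : ((k : Int) + 1) = ((k + 1 : Nat) : Int) := by push_cast; ring
      rw [h1, PySem.List.slice_from_natCast, PySem.List.pyGet?_natCast]
      have h2 : PySem.List.slice ws (some ((0 : Nat) : Int)) (some ((k + 1 : Nat) : Int))
          = (ws.drop 0).take (k + 1 - 0) := PySem.List.slice_natCast ws 0 (k + 1)
      simp only [Nat.cast_zero] at h2
      rw [h2]
      simp

-- B's terminator test is the disjunction of A's three membership tests.
lemma pvTerm_eq (w : String) :
    pvTerm w = (PySem.Str.isIn "?" w || (PySem.Str.isIn "." w || PySem.Str.isIn "!" w)) := by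
  have h : ".!?".toList = ['.', '!', '?'] := rfl
  rw [pvTerm, h]
  simp only [List.any_cons, List.any_nil]
  have e1 : PySem.Str.isIn (String.ofList ['.']) w = PySem.Str.isIn "." w := rfl
  have e2 : PySem.Str.isIn (String.ofList ['!']) w = PySem.Str.isIn "!" w := rfl
  have e3 : PySem.Str.isIn (String.ofList ['?']) w = PySem.Str.isIn "?" w := rfl
  rw [e1, e2, e3]
  cases PySem.Str.isIn "." w <;> cases PySem.Str.isIn "!" w <;>
    cases PySem.Str.isIn "?" w <;> rfl

lemma pvStepA_quest (d : PySem.Dict Int String) (cur : List String) (w : String)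
    (h : PySem.Str.isIn "?" w = true) :
    pvStepA (d, cur) w
      = (d.insert ((d.size : Int) + 1) (PySem.Str.join " " (cur ++ [w])), []) := by
  simp only [pvStepA, List.getLastD_concat]
  rw [if_pos h]

lemma pvStepA_term (d : PySem.Dict Int String) (cur : List String) (w : String)
    (hq : PySem.Str.isIn "?" w = false)
    (hd : (PySem.Str.isIn "." w || PySem.Str.isIn "!" w) = true) :
    pvStepA (d, cur) w = (d, []) := by
  simp only [pvStepA, List.getLastD_concat]
  rw [if_neg (by rw [hq]; exact Bool.false_ne_true), if_pos hd]

lemma pvStepA_acc (d : PySem.Dict Int String) (cur : List String) (w : String)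
    (hq : PySem.Str.isIn "?" w = false)
    (hd : (PySem.Str.isIn "." w || PySem.Str.isIn "!" w) = false) :
    pvStepA (d, cur) w = (d, cur ++ [w]) := by
  simp only [pvStepA, List.getLastD_concat]
  rw [if_neg (by rw [hq]; exact Bool.false_ne_true),
    if_neg (by rw [hd]; exact Bool.false_ne_true)]

-- extending the pending prefix past a non-terminator word
lemma pvTail_cons_acc (cur : List String) (w : String) (ws : List String)
    (hw : pvTerm w = false) :
    pvTail cur (w :: ws) = pvTail (cur ++ [w]) ws := by
  rw [pvTail, pvTail, List.findIdx?_cons, if_neg (by rw [hw]; exact Bool.false_ne_true)]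
  cases h : ws.findIdx? pvTerm with
  | none => rfl
  | some k =>
      simp only [Option.map_some]
      rw [List.getElem?_cons_succ, List.take_succ_cons, List.drop_succ_cons]
      simp [List.append_assoc]

-- the main invariant: A's fold from state (d, cur) produces d.values followed by
-- B's loop output for the remaining words with pending prefix cur
lemma pvLoop_eq (ws : List String) (d : PySem.Dict Int String) (cur : List String)
    (hinv : ∀ k ∈ d.keys, k ≤ (d.size : Int)) :
    (ws.foldl pvStepA (d, cur)).1.values = d.values ++ pvTail cur ws := by
  induction ws generalizing d cur with
  | nil => simp [pvTail]
  | cons w ws ih =>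
    have hfresh : d.contains ((d.size : Int) + 1) = false := by
      by_contra h
      have hc : d.contains ((d.size : Int) + 1) = true := by
        cases hcb : d.contains ((d.size : Int) + 1) with
        | false => exact absurd hcb h
        | true => rfl
      have hm := (PySem.Dict.contains_iff_mem_keys d ((d.size : Int) + 1)).mp hc
      have := hinv _ hm
      omega
    rw [List.foldl_cons]
    by_cases hq : PySem.Str.isIn "?" w = true
    · -- '?' in w: A emits the joined segment; B finds the terminator at index 0
      have hvals : (d.insert ((d.size : Int) + 1) (PySem.Str.join " " (cur ++ [w]))).values
          = d.values ++ [PySem.Str.join " " (cur ++ [w])] := by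
        simp only [PySem.Dict.values,
          PySem.Dict.items_insert_of_not_contains d _ hfresh, List.map_append]
        rfl
      have hinv' : ∀ k ∈ (d.insert ((d.size : Int) + 1)
          (PySem.Str.join " " (cur ++ [w]))).keys,
          k ≤ ((d.insert ((d.size : Int) + 1)
            (PySem.Str.join " " (cur ++ [w]))).size : Int) := by
        intro k hk
        rw [PySem.Dict.keys_insert_of_not_contains d _ hfresh] at hk
        rw [PySem.Dict.size_insert, if_neg (by rw [hfresh]; exact Bool.false_ne_true)]
        rcases List.mem_append.mp hk with hk | hk
        · have := hinv _ hk; push_cast; omega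
        · simp at hk; subst hk; push_cast; omega
      rw [pvStepA_quest d cur w hq, ih _ _ hinv', hvals, pvTail_nil_eq]
      rw [pvTail, List.findIdx?_cons, if_pos (by rw [pvTerm_eq, hq]; rfl)]
      have hq2 : PySem.Chars.isIn ['?'] w.toList = true := hq
      simp [hq2]
    · have hq' : PySem.Str.isIn "?" w = false := by
        cases h : PySem.Str.isIn "?" w with
        | false => rfl
        | true => exact absurd h hq
      by_cases hd : (PySem.Str.isIn "." w || PySem.Str.isIn "!" w) = true
      · -- '.' or '!' (no '?') in w: A discards; B finds the terminator at 0, keeps nothing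
        rw [pvStepA_term d cur w hq' hd, ih _ _ hinv, pvTail_nil_eq]
        rw [pvTail, List.findIdx?_cons, if_pos (by rw [pvTerm_eq, hq', hd]; rfl)]
        have hq2 : PySem.Chars.isIn ['?'] w.toList = false := hq'
        simp [hq2]
      · -- no terminator in w: A accumulates; B's search skips w
        have hd' : (PySem.Str.isIn "." w || PySem.Str.isIn "!" w) = false := by
          cases h : (PySem.Str.isIn "." w || PySem.Str.isIn "!" w) with
          | false => rfl
          | true => exact absurd h hd
        rw [pvStepA_acc d cur w hq' hd', ih _ _ hinv,
          pvTail_cons_acc cur w ws (by rw [pvTerm_eq, hq', hd']; rfl)]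

-- ===== VERDICT (by name: the statement is the Claim_ definition above) =====
theorem SearchQuestions_spec : Claim_equal_SearchQuestions := by
  intro _list _hdom
  show SearchQuestions _list = SearchQuestions_alt _list
  unfold SearchQuestions
  rw [pvLoop_eq _ _ _ (by simp [PySem.Dict.keys_empty]), pvTail_nil_eq]
  simp [PySem.Dict.values, PySem.Dict.empty]
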